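-- pv_equiv track=rewrite | github.com/mike-dono-0815/learn-german | expand_plurals.py | apply_umlaut
-- ===== SOURCE A (Python) =====
-- def apply_umlaut(word):
--     """Apply umlaut to the last a, o, u, or au in a word."""
--     for i in range(len(word) - 1, 0, -1):
--         pair = word[i-1:i+1]
--         if pair == 'au':
--             return word[:i-1] + 'äu' + word[i+1:]
--         if pair == 'Au':
--             return word[:i-1] + 'Äu' + word[i+1:]
--     for i in range(len(word) - 1, -1, -1):
--         if word[i] in 'aouAOU':
--             rep = {'a': 'ä', 'o': 'ö', 'u': 'ü', 'A': 'Ä', 'O': 'Ö', 'U': 'Ü'}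
--             return word[:i] + rep[word[i]] + word[i+1:]
--     return word
-- ===== SOURCE B (Python) =====
-- REP = {'a': 'ä', 'o': 'ö', 'u': 'ü', 'A': 'Ä', 'O': 'Ö', 'U': 'Ü'}
--
-- def apply_umlaut(word):
--     """Apply umlaut to the last a, o, u, or au in a word (single forward pass)."""
--     diph = -1
--     vow = -1
--     prev = ''
--     for idx, ch in enumerate(word):
--         if ch == 'u' and (prev == 'a' or prev == 'A'):
--             diph = idx - 1
--         if ch in REP:
--             vow = idx
--         prev = ch
--     if diph != -1:
--         return word[:diph] + ('äu' if word[diph] == 'a' else 'Äu') + word[diph+2:]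
--     if vow != -1:
--         return word[:vow] + REP[word[vow]] + word[vow+1:]
--     return word
-- ===== Notes on version B (the rewrite author's own statement) =====
-- stated objective: faster
-- what changed: Replaces A's two descending character scans (first for the diphthong, then for a single vowel, each building a 2-char slice per step) by a single left-to-right pass that tracks the start of the last diphthong and the position of the last single vowel in accumulators, followed by one slice-and-splice at the end.
import Mathlib
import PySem

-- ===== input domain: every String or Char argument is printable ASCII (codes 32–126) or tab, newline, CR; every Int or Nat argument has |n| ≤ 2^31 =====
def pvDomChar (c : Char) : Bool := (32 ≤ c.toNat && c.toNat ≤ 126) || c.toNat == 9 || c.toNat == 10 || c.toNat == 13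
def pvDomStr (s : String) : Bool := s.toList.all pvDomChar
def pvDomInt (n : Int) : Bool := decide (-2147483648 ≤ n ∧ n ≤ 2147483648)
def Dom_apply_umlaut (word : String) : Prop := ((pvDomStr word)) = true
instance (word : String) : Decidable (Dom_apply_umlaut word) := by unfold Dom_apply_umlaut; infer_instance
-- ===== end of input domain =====

-- B replaces A's two descending character scans by a single forward pass with accumulators (alternative decomposition); return values proved equal on all inputs.

-- ===== PORT A =====
def pvRep : PySem.Dict Char (List Char) :=
  PySem.Dict.ofList [('a', ['ä']), ('o', ['ö']), ('u', ['ü']), ('A', ['Ä']), ('O', ['Ö']), ('U', ['Ü'])]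

def pvLoop1 (cs : List Char) : List Int → Option (List Char)
  | [] => none
  | i :: rest =>
    let pair := PySem.List.slice cs (some (i - 1)) (some (i + 1))
    if pair = ['a', 'u'] then
      some (PySem.List.slice cs none (some (i - 1)) ++ ['ä', 'u'] ++ PySem.List.slice cs (some (i + 1)) none)
    else if pair = ['A', 'u'] then
      some (PySem.List.slice cs none (some (i - 1)) ++ ['Ä', 'u'] ++ PySem.List.slice cs (some (i + 1)) none)
    else pvLoop1 cs rest

def pvLoop2 (cs : List Char) : List Int → Option (List Char)
  | [] => none
  | i :: rest =>
    let c := PySem.List.pyGetD cs i ' '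
    if PySem.Chars.isIn [c] ("aouAOU".toList) then
      some (PySem.List.slice cs none (some i) ++ PySem.Dict.getD pvRep c ['?'] ++ PySem.List.slice cs (some (i + 1)) none)
    else pvLoop2 cs rest

def apply_umlaut (word : String) : String :=
  let cs := word.toList
  match pvLoop1 cs (PySem.List.pyRange ((cs.length : Int) - 1) 0 (-1)) with
  | some r => String.ofList r
  | none =>
    match pvLoop2 cs (PySem.List.pyRange ((cs.length : Int) - 1) (-1) (-1)) with
    | some r => String.ofList r
    | none => word

-- ===== PORT B =====
def pvStep (st : Int × Int × List Char) (p : Int × Char) : Int × Int × List Char :=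
  let diph' := if p.2 = 'u' ∧ (st.2.2 = ['a'] ∨ st.2.2 = ['A']) then p.1 - 1 else st.1
  let vow' := if (PySem.Dict.get? pvRep p.2).isSome then p.1 else st.2.1
  (diph', vow', [p.2])

def apply_umlaut_alt (word : String) : String :=
  let cs := word.toList
  let st := (PySem.List.enumerate cs 0).foldl pvStep ((-1 : Int), (-1 : Int), ([] : List Char))
  if st.1 ≠ -1 then
    String.ofList (PySem.List.slice cs none (some st.1) ++
      (if PySem.List.pyGetD cs st.1 ' ' = 'a' then ['ä', 'u'] else ['Ä', 'u']) ++
      PySem.List.slice cs (some (st.1 + 2)) none)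
  else if st.2.1 ≠ -1 then
    String.ofList (PySem.List.slice cs none (some st.2.1) ++
      PySem.Dict.getD pvRep (PySem.List.pyGetD cs st.2.1 ' ') ['?'] ++
      PySem.List.slice cs (some (st.2.1 + 1)) none)
  else word

-- ===== PRECONDITION & SPEC =====
def Spec_apply_umlaut (word : String) (out : String) : Prop := out = apply_umlaut_alt word
instance (word : String) (out : String) : Decidable (Spec_apply_umlaut word out) := by unfold Spec_apply_umlaut; infer_instance

-- ===== CLAIM (what is proved, stated in full; the proofs are below) =====
def Claim_equal_apply_umlaut : Prop := ∀ (word : String), Dom_apply_umlaut word → Spec_apply_umlaut word (apply_umlaut word)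

-- ===== LEMMAS AND PROOFS =====
def pvDsearch (q : Nat → Bool) : Nat → Option Nat
  | 0 => none
  | k + 1 => if q k then some k else pvDsearch q k

def pvQd (cs : List Char) (p : Nat) : Bool :=
  decide ((cs.getD p ' ' = 'a' ∨ cs.getD p ' ' = 'A') ∧ cs.getD (p + 1) ' ' = 'u')

def pvQv (cs : List Char) (p : Nat) : Bool :=
  decide (cs.getD p ' ' ∈ (['a', 'o', 'u', 'A', 'O', 'U'] : List Char))

def pvBody1 (cs : List Char) (p : Nat) : List Char :=
  PySem.List.slice cs none (some (p : Int)) ++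
    (if cs.getD p ' ' = 'a' then ['ä', 'u'] else ['Ä', 'u']) ++
    PySem.List.slice cs (some ((p : Int) + 2)) none

def pvBody2 (cs : List Char) (p : Nat) : List Char :=
  PySem.List.slice cs none (some (p : Int)) ++
    PySem.Dict.getD pvRep (cs.getD p ' ') ['?'] ++
    PySem.List.slice cs (some ((p : Int) + 1)) none

def pvOpt : Option Nat → Int
  | none => -1
  | some p => (p : Int)

def pvLastPrev (cs : List Char) : List Char :=
  match cs.getLast? with
  | none => []
  | some c => [c]

theorem pv_rep_isSome (c : Char) :
    (PySem.Dict.get? pvRep c).isSome = decide (c ∈ (['a', 'o', 'u', 'A', 'O', 'U'] : List Char)) := by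
  have hrep : pvRep = PySem.Dict.mk [('a', ['ä']), ('o', ['ö']), ('u', ['ü']), ('A', ['Ä']), ('O', ['Ö']), ('U', ['Ü'])] := by decide
  rw [hrep]
  simp only [PySem.Dict.get?_mk_cons]
  split_ifs with h1 h2 h3 h4 h5 h6
  · rw [← eq_of_beq h1]; decide
  · rw [← eq_of_beq h2]; decide
  · rw [← eq_of_beq h3]; decide
  · rw [← eq_of_beq h4]; decide
  · rw [← eq_of_beq h5]; decide
  · rw [← eq_of_beq h6]; decide
  · have : c ∉ (['a', 'o', 'u', 'A', 'O', 'U'] : List Char) := by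
      simp only [List.mem_cons, List.not_mem_nil, or_false, not_or]
      exact ⟨fun e => h1 (beq_iff_eq.mpr e.symm), fun e => h2 (beq_iff_eq.mpr e.symm),
        fun e => h3 (beq_iff_eq.mpr e.symm), fun e => h4 (beq_iff_eq.mpr e.symm),
        fun e => h5 (beq_iff_eq.mpr e.symm), fun e => h6 (beq_iff_eq.mpr e.symm)⟩
    simp [this, PySem.Dict.get?]

theorem pv_pair_eq (cs : List Char) (k : Nat) (h : k + 2 ≤ cs.length) :
    PySem.List.slice cs (some (k : Int)) (some ((k : Int) + 2)) = [cs.getD k ' ', cs.getD (k + 1) ' '] := by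
  have h2 : ((k : Int) + 2) = ((k + 2 : Nat) : Int) := by push_cast; ring
  have hk : k < cs.length := by omega
  have hk1 : k + 1 < cs.length := by omega
  have e1 : cs.getD k ' ' = cs[k] := List.getD_eq_getElem cs ' ' hk
  have e2 : cs.getD (k + 1) ' ' = cs[k + 1] := List.getD_eq_getElem cs ' ' hk1
  rw [h2, PySem.List.slice_natCast, e1, e2]
  have : k + 2 - k = 2 := by omega
  rw [this, List.drop_eq_getElem_cons hk]
  have : cs.drop (k + 1) = cs[k + 1] :: cs.drop (k + 2) := List.drop_eq_getElem_cons hk1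
  rw [this]
  rfl

theorem pv_isIn_singleton (c : Char) (s : List Char) :
    PySem.Chars.isIn [c] s = decide (c ∈ s) := by
  by_cases h : c ∈ s
  · simp [h]
    rw [PySem.Chars.isIn_iff_infix]
    obtain ⟨l1, l2, rfl⟩ := List.mem_iff_append.mp h
    exact ⟨l1, l2, by simp⟩
  · simp [h]
    rw [PySem.Chars.isIn_eq_false_iff]
    intro hin
    exact h (hin.mem (by simp))

theorem pvDsearch_congr (q q' : Nat → Bool) (k : Nat) (h : ∀ p, p < k → q p = q' p) :
    pvDsearch q k = pvDsearch q' k := by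
  induction k with
  | zero => rfl
  | succ k ih =>
    simp only [pvDsearch, h k (Nat.lt_succ_self k)]
    rw [ih (fun p hp => h p (Nat.lt_succ_of_lt hp))]

theorem pvLoop1_eq (cs : List Char) (k : Nat) (hk : k < cs.length) :
    pvLoop1 cs (PySem.List.pyRange (k : Int) 0 (-1)) = (pvDsearch (pvQd cs) k).map (pvBody1 cs) := by
  induction k with
  | zero =>
    rw [PySem.List.pyRange_neg_one_eq_nil (by norm_num)]
    rfl
  | succ k ih =>
    rw [PySem.List.pyRange_neg_one_cons (by omega)]
    have hc2 : ((k + 1 : Nat) : Int) = (k : Int) + 1 := by push_cast; ring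
    have hc : ((k : Int) + 1 - 1) = (k : Int) := by ring
    have hc3 : ((k : Int) + 1 + 1) = (k : Int) + 2 := by ring
    simp only [pvLoop1, hc2, hc, hc3]
    rw [pv_pair_eq cs k (by omega)]
    have hrec := ih (by omega)
    by_cases hu : cs[k+1]?.getD ' ' = 'u'
    · by_cases ha : cs[k]?.getD ' ' = 'a'
      · have hq : pvQd cs k = true := by simp [pvQd, ha, hu]
        simp [ha, hu, hq, pvDsearch, pvBody1]
      · by_cases hA : cs[k]?.getD ' ' = 'A'
        · have hq : pvQd cs k = true := by simp [pvQd, hA, hu]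
          simp [hA, hu, hq, pvDsearch, pvBody1]
        · have hq : pvQd cs k = false := by simp [pvQd, ha, hA]
          simp [ha, hA, hq, pvDsearch, hrec]
    · have hq : pvQd cs k = false := by simp [pvQd, hu]
      simp [hu, hq, pvDsearch, hrec]

theorem pvLoop2_eq (cs : List Char) (k : Nat) (hk : k ≤ cs.length) :
    pvLoop2 cs (PySem.List.pyRange ((k : Int) - 1) (-1) (-1)) = (pvDsearch (pvQv cs) k).map (pvBody2 cs) := by
  induction k with
  | zero =>
    rw [PySem.List.pyRange_neg_one_eq_nil (by norm_num)]
    rfl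
  | succ k ih =>
    have hc : ((k + 1 : Nat) : Int) - 1 = (k : Int) := by push_cast; ring
    rw [hc, PySem.List.pyRange_neg_one_cons (by omega)]
    simp only [pvLoop2, PySem.List.pyGetD_natCast]
    rw [pv_isIn_singleton]
    have hc' : ((k : Int) + 1) = ((k + 1 : Nat) : Int) := by push_cast; ring
    have hrec := ih (by omega)
    by_cases hv : cs[k]?.getD ' ' ∈ (['a', 'o', 'u', 'A', 'O', 'U'] : List Char)
    · have hq : pvQv cs k = true := by simp [pvQv, hv]
      simp [hv, hq, pvDsearch, pvBody2]
    · have hq : pvQv cs k = false := by simp [pvQv, hv]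
      simp [hv, hq, pvDsearch, hrec]

theorem pvFold_eq (cs : List Char) :
    (PySem.List.enumerate cs 0).foldl pvStep ((-1 : Int), (-1 : Int), ([] : List Char)) =
      (pvOpt (pvDsearch (pvQd cs) (cs.length - 1)), pvOpt (pvDsearch (pvQv cs) cs.length), pvLastPrev cs) := by
  induction cs using List.reverseRecOn with
  | nil => rfl
  | append_singleton ys c ih =>
    rw [PySem.List.enumerate_append, List.foldl_append, ih]
    have hcongv : pvDsearch (pvQv (ys ++ [c])) ys.length = pvDsearch (pvQv ys) ys.length := by
      apply pvDsearch_congr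
      intro p hp
      simp [pvQv, List.getElem?_append_left hp]
    have hvq : pvQv (ys ++ [c]) ys.length = decide (c ∈ (['a', 'o', 'u', 'A', 'O', 'U'] : List Char)) := by
      simp [pvQv]
    have hlen : (ys ++ [c]).length = ys.length + 1 := by simp
    simp only [PySem.List.enumerate, List.foldl_cons, List.foldl_nil, pvStep, hlen]
    refine Prod.ext ?_ (Prod.ext ?_ ?_)
    · -- diph component
      by_cases hys : ys = []
      · subst hys; simp [pvLastPrev, pvDsearch, pvOpt]
      · obtain ⟨m, hm⟩ : ∃ m, ys.length = m + 1 := ⟨ys.length - 1, by cases ys <;> simp_all⟩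
        have hmlt : m < ys.length := by omega
        have hgm : ys[m]? = some (ys[m]) := List.getElem?_eq_getElem hmlt
        have hprev : pvLastPrev ys = [ys[m]?.getD ' '] := by
          simp [pvLastPrev, List.getLast?_eq_getElem?, hm]
        have hqd : pvQd (ys ++ [c]) m = decide ((ys[m]?.getD ' ' = 'a' ∨ ys[m]?.getD ' ' = 'A') ∧ c = 'u') := by
          have h1 : (ys ++ [c])[m]? = ys[m]? := List.getElem?_append_left hmlt
          have h2 : (ys ++ [c])[m + 1]? = some c := by rw [← hm]; exact List.getElem?_concat_length
          simp [pvQd, h1, h2]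
        have hcong : pvDsearch (pvQd (ys ++ [c])) m = pvDsearch (pvQd ys) m := by
          apply pvDsearch_congr; intro p hp
          have h1 : (ys ++ [c])[p]? = ys[p]? := List.getElem?_append_left (by omega)
          have h2 : (ys ++ [c])[p + 1]? = ys[p + 1]? := List.getElem?_append_left (by omega)
          simp [pvQd, h1, h2]
        rw [hm]
        simp only [Nat.add_sub_cancel, pvDsearch, hqd, hcong, hprev]
        by_cases hq : (ys[m]?.getD ' ' = 'a' ∨ ys[m]?.getD ' ' = 'A') ∧ c = 'u'
        · rcases hq with ⟨hav, hc⟩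
          rcases hav with hav | hav <;> simp [hav, hc, pvOpt]
        · have hdec : decide ((ys[m]?.getD ' ' = 'a' ∨ ys[m]?.getD ' ' = 'A') ∧ c = 'u') = false := by
            simp only [decide_eq_false_iff_not]; exact hq
          rw [hdec]
          simp only [Bool.false_eq_true, if_false]
          have hcnd : ¬(c = 'u' ∧ ([ys[m]?.getD ' '] = ['a'] ∨ [ys[m]?.getD ' '] = ['A'])) := by
            intro ⟨h1, h2⟩
            exact hq ⟨by simpa using h2, h1⟩
          rw [if_neg hcnd]
    · -- vow component
      show (if (PySem.Dict.get? pvRep c).isSome then (0 + (ys.length : Int)) else pvOpt (pvDsearch (pvQv ys) ys.length)) =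
        pvOpt (pvDsearch (pvQv (ys ++ [c])) (ys.length + 1))
      rw [pv_rep_isSome c]
      simp only [pvDsearch, hvq, hcongv]
      by_cases hcv : c ∈ (['a', 'o', 'u', 'A', 'O', 'U'] : List Char)
      · simp [hcv, pvOpt]
      · simp [hcv]
    · -- prev component
      show [c] = pvLastPrev (ys ++ [c])
      simp [pvLastPrev]

theorem pv_main (word : String) : apply_umlaut word = apply_umlaut_alt word := by
  unfold apply_umlaut apply_umlaut_alt
  simp only []
  rw [pvFold_eq]
  rcases Nat.eq_zero_or_eq_succ_pred word.toList.length with h0 | hm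
  · rw [List.length_eq_zero_iff] at h0
    simp [h0, pvLoop1, pvLoop2, pvDsearch, pvOpt,
      PySem.List.pyRange_neg_one_eq_nil (by norm_num : (-1 : Int) ≤ 0)]
  · set cs := word.toList with hcs
    set m := cs.length - 1 with hmdef
    have hm' : cs.length = m + 1 := hm
    have hcast1 : ((cs.length : Int) - 1) = ((m : Nat) : Int) := by rw [hm']; push_cast; ring
    rw [hcast1, pvLoop1_eq cs m (by omega)]
    have hl2 : pvLoop2 cs (PySem.List.pyRange ((m : Int)) (-1) (-1)) =
        (pvDsearch (pvQv cs) (m + 1)).map (pvBody2 cs) := by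
      have := pvLoop2_eq cs (m + 1) (by omega)
      have hc : ((m + 1 : Nat) : Int) - 1 = (m : Int) := by push_cast; ring
      rwa [hc] at this
    rw [hm']
    cases hd : pvDsearch (pvQd cs) m with
    | some p =>
      have hne : ((p : Nat) : Int) ≠ -1 := by omega
      simp [pvOpt, hne, pvBody1, PySem.List.pyGetD_natCast]
    | none =>
      simp only [Option.map_none, pvOpt]
      rw [hl2]
      cases hv : pvDsearch (pvQv cs) (m + 1) with
      | some p =>
        have hne : ((p : Nat) : Int) ≠ -1 := by omega
        simp [hne, pvBody2, PySem.List.pyGetD_natCast]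
      | none =>
        simp

-- ===== VERDICT (by name: the statement is the Claim_ definition above) =====
theorem apply_umlaut_spec : Claim_equal_apply_umlaut := by
  intro word _
  unfold Spec_apply_umlaut
  exact pv_main word
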